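-- pv_equiv track=rewrite | github.com/pmodukuru/ECE364 | Prelabs/Practice Exam 1/practical1.py | replacePeriod
-- ===== SOURCE A (Python) =====
-- def replacePeriod(row, val):
--     nlist = []
--     for i in row:
--         if i == '.':
--             nlist.extend(val)
--         else:
--             nlist.append(i)
--     return nlist
-- ===== SOURCE B (Python) =====
-- def replacePeriod(row, val):
--     # Split row on '.' into segments, then join the segments with val as separator.
--     segments = []
--     cur = []
--     for i in row:
--         if i == '.':
--             segments.append(cur)
--             cur = []
--         else:
--             cur.append(i)
--     segments.append(cur)
--     out = segments[0]
--     for seg in segments[1:]: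
--         out = out + val + seg
--     return out
-- ===== Notes on version B (the rewrite author's own statement) =====
-- stated objective: alternative
-- what changed: B splits the row on '.' into segments in one pass and then joins the segments with val as separator, instead of A's per-element branch that extends or appends into one accumulator.
import Mathlib
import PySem

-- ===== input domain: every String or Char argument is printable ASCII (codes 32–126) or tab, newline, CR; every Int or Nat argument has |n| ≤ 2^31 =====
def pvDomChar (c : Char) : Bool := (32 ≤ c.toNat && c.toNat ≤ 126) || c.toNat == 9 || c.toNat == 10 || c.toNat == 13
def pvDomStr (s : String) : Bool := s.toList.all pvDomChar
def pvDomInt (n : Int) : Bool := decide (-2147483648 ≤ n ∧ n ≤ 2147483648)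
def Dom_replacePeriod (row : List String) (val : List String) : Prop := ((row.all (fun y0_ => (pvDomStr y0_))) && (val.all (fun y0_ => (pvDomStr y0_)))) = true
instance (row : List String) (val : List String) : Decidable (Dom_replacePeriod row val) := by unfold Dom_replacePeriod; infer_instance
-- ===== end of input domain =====

-- B splits the row on '.' into segments, then joins them with val as separator; alternative decomposition, same cost.

-- ===== PORT A =====
def replacePeriod (row : List String) (val : List String) : List String :=
  row.foldl (fun nlist i => if i == "." then nlist ++ val else nlist ++ [i]) []

-- ===== PORT B =====
def replacePeriod_alt (row : List String) (val : List String) : List String :=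
  let p := row.foldl
    (fun (st : List (List String) × List String) i =>
      if i == "." then (st.1 ++ [st.2], []) else (st.1, st.2 ++ [i]))
    ([], [])
  let segments := p.1 ++ [p.2]
  match segments with
  | [] => []
  | s0 :: rest => rest.foldl (fun out seg => out ++ val ++ seg) s0

-- ===== PRECONDITION & SPEC =====
def Spec_replacePeriod (row : List String) (val : List String) (out : List String) : Prop := out = replacePeriod_alt row val
instance (row : List String) (val : List String) (out : List String) : Decidable (Spec_replacePeriod row val out) := by unfold Spec_replacePeriod; infer_instance

-- ===== CLAIM (what is proved, stated in full; the proofs are below) =====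
def Claim_equal_replacePeriod : Prop := ∀ (row : List String) (val : List String), Dom_replacePeriod row val → Spec_replacePeriod row val (replacePeriod row val)

-- ===== LEMMAS AND PROOFS =====

-- semantic target shared by both proofs
def pvGseg (val : List String) (i : String) : List String :=
  if i == "." then val else [i]

-- join of a nonempty segment list, with val between segments
def pvJoin (val : List String) (l : List (List String)) : List String :=
  match l with
  | [] => []
  | s0 :: rest => s0 ++ rest.flatMap (fun seg => val ++ seg)

lemma replacePeriod_eq_flatMap (row val : List String) :
    replacePeriod row val = row.flatMap (pvGseg val) := by
  unfold replacePeriod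
  have h : ∀ (nlist : List String) (i : String),
      (if i == "." then nlist ++ val else nlist ++ [i]) = nlist ++ pvGseg val i := by
    intro nlist i; unfold pvGseg; split <;> rfl
  simp only [h]
  simpa using PySem.List.foldl_append_eq_flatMap (pvGseg val) row []

lemma pvJoin_push (val : List String) (segs : List (List String)) (cur : List String) :
    pvJoin val ((segs ++ [cur]) ++ [[]]) = pvJoin val (segs ++ [cur]) ++ val := by
  cases segs with
  | nil => simp [pvJoin]
  | cons s r => simp [pvJoin]

lemma pvJoin_last (val : List String) (segs : List (List String)) (cur : List String) (i : String) :
    pvJoin val (segs ++ [cur ++ [i]]) = pvJoin val (segs ++ [cur]) ++ [i] := by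
  cases segs with
  | nil => simp [pvJoin]
  | cons s r => simp [pvJoin]

lemma split_invariant (val : List String) :
    ∀ (row : List String) (segs : List (List String)) (cur : List String),
    pvJoin val ((row.foldl
        (fun (st : List (List String) × List String) i =>
          if i == "." then (st.1 ++ [st.2], []) else (st.1, st.2 ++ [i]))
        (segs, cur)).1 ++
      [(row.foldl
        (fun (st : List (List String) × List String) i =>
          if i == "." then (st.1 ++ [st.2], []) else (st.1, st.2 ++ [i]))
        (segs, cur)).2]) =
    pvJoin val (segs ++ [cur]) ++ row.flatMap (pvGseg val) := by
  intro row
  induction row with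
  | nil => intro segs cur; simp
  | cons i row ih =>
    intro segs cur
    by_cases hi : i == "."
    · simp only [List.foldl_cons, hi, if_pos, List.flatMap_cons]
      rw [ih (segs ++ [cur]) [], pvJoin_push]
      have : pvGseg val i = val := by unfold pvGseg; simp [hi]
      simp [this]
    · simp only [List.foldl_cons, hi, Bool.false_eq_true, if_false, List.flatMap_cons]
      rw [ih segs (cur ++ [i]), pvJoin_last]
      have : pvGseg val i = [i] := by unfold pvGseg; simp [hi]
      simp [this]

lemma replacePeriod_alt_eq_flatMap (row val : List String) :
    replacePeriod_alt row val = row.flatMap (pvGseg val) := by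
  unfold replacePeriod_alt
  have hfold : ∀ (s0 : List String) (rest : List (List String)),
      rest.foldl (fun out seg => out ++ val ++ seg) s0 = pvJoin val (s0 :: rest) := by
    intro s0 rest
    have h : ∀ (out seg : List String), out ++ val ++ seg = out ++ (val ++ seg) := by
      intro out seg; simp
    simp only [h]
    rw [PySem.List.foldl_append_eq_flatMap (fun seg => val ++ seg) rest s0]
    rfl
  have hinv := split_invariant val row [] []
  simp only [pvJoin, List.nil_append, List.flatMap_nil, List.append_nil] at hinv
  cases hp : (row.foldl
        (fun (st : List (List String) × List String) i =>
          if i == "." then (st.1 ++ [st.2], []) else (st.1, st.2 ++ [i]))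
        ([], [])).1 ++
      [(row.foldl
        (fun (st : List (List String) × List String) i =>
          if i == "." then (st.1 ++ [st.2], []) else (st.1, st.2 ++ [i]))
        ([], [])).2] with
  | nil => exact absurd hp (by simp)
  | cons s0 rest =>
    simp only [hp] at hinv ⊢
    rw [hfold]
    exact hinv

-- ===== VERDICT (by name: the statement is the Claim_ definition above) =====
theorem replacePeriod_spec : Claim_equal_replacePeriod := by
  intro row val _
  unfold Spec_replacePeriod
  rw [replacePeriod_eq_flatMap, replacePeriod_alt_eq_flatMap]
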